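-- pv_equiv track=rewrite | github.com/dogfrontcode/server_closefriends | static/cnh_matriz/pdf_coordinates.py | calculate_stacked_positions
-- ===== SOURCE A (Python) =====
-- def calculate_stacked_positions(start_x, start_y, spacing, image_heights):
--     """
--     Calcula posições Y dinâmicas para layout empilhado.
--
--     Args:
--         start_x (int): Posição X inicial
--         start_y (int): Posição Y inicial
--         spacing (int): Espaçamento entre imagens
--         image_heights (list): Lista com alturas das imagens [front, back, back2, qrcode]
--
--     Returns:
--         dict: Posições calculadas {"front": (x,y), "back": (x,y), ...}
--     """
--     positions = {}
--     current_y = start_y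
--     image_names = ["front", "back", "back2", "qrcode"]
--
--     for i, name in enumerate(image_names):
--         positions[name] = (start_x, current_y)
--         if i < len(image_heights):
--             current_y += image_heights[i] + spacing
--         else:
--             current_y += 500 + spacing  # altura padrão se não especificada
--
--     return positions
-- ===== SOURCE B (Python) =====
-- def calculate_stacked_positions(start_x, start_y, spacing, image_heights):
--     image_names = ["front", "back", "back2", "qrcode"]
--
--     def effective_height(j):
--         return image_heights[j] if j < len(image_heights) else 500
--
--     return {
--         name: (start_x,
--                start_y + sum(effective_height(j) + spacing for j in range(i)))
--         for i, name in enumerate(image_names)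
--     }
-- ===== Notes on version B (the rewrite author's own statement) =====
-- stated objective: alternative
-- what changed: Replaces the stateful loop threading a running current_y through a mutated dict with a dict comprehension that computes each slot's Y directly as start_y plus the prefix sum of effective heights (image_heights[j] or the 500 default) plus spacing over the preceding slots.
import Mathlib
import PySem

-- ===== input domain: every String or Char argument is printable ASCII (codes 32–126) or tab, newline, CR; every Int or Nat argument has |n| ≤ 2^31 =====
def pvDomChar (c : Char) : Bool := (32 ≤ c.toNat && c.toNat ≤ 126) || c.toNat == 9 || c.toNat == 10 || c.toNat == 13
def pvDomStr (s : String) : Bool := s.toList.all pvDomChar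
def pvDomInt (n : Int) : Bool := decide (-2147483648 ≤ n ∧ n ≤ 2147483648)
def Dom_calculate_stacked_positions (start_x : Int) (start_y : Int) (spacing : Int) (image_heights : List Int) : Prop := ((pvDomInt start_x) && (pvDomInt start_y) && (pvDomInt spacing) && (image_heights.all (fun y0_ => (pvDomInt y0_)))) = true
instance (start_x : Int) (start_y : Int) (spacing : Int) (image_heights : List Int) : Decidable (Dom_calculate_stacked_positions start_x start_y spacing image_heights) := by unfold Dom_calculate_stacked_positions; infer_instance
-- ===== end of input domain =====

-- B builds each Y directly as start_y + prefix sum of effective heights (alternative decomposition; A mutates a dict, return value equivalence is what is proved).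


-- ===== PORT A =====
def calculate_stacked_positions (start_x : Int) (start_y : Int) (spacing : Int) (image_heights : List Int) : List (String × Int × Int) :=
  let image_names : List String := ["front", "back", "back2", "qrcode"]
  let st := (PySem.List.enumerate image_names 0).foldl
    (fun (st : PySem.Dict String (Int × Int) × Int) (p : Int × String) =>
      let positions := st.1.insert p.2 (start_x, st.2)
      let current_y :=
        if p.1 < (image_heights.length : Int) then
          st.2 + (PySem.List.pyGetD image_heights p.1 0 + spacing)
        else
          st.2 + (500 + spacing)
      (positions, current_y))
    (PySem.Dict.empty, start_y)
  st.1.items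

-- ===== PORT B =====
-- effective height of slot j: image_heights[j] if j < len(image_heights) else 500
def pvEffHeight (image_heights : List Int) (j : Int) : Int :=
  if j < (image_heights.length : Int) then PySem.List.pyGetD image_heights j 0 else 500

def calculate_stacked_positions_alt (start_x : Int) (start_y : Int) (spacing : Int) (image_heights : List Int) : List (String × Int × Int) :=
  (PySem.List.enumerate ["front", "back", "back2", "qrcode"] 0).map
    (fun (p : Int × String) =>
      (p.2, (start_x,
             start_y + (PySem.List.pyRange 0 p.1 1).foldl
               (fun acc j => acc + (pvEffHeight image_heights j + spacing)) 0)))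

-- ===== PRECONDITION & SPEC =====
def Spec_calculate_stacked_positions (start_x : Int) (start_y : Int) (spacing : Int) (image_heights : List Int) (out : List (String × Int × Int)) : Prop := out = calculate_stacked_positions_alt start_x start_y spacing image_heights
instance (start_x : Int) (start_y : Int) (spacing : Int) (image_heights : List Int) (out : List (String × Int × Int)) : Decidable (Spec_calculate_stacked_positions start_x start_y spacing image_heights out) := by unfold Spec_calculate_stacked_positions; infer_instance

-- ===== CLAIM (what is proved, stated in full; the proofs are below) =====
def Claim_equal_calculate_stacked_positions : Prop := ∀ (start_x : Int) (start_y : Int) (spacing : Int) (image_heights : List Int), Dom_calculate_stacked_positions start_x start_y spacing image_heights → Spec_calculate_stacked_positions start_x start_y spacing image_heights (calculate_stacked_positions start_x start_y spacing image_heights)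

-- ===== LEMMAS AND PROOFS =====

-- ===== VERDICT (by name: the statement is the Claim_ definition above) =====
theorem calculate_stacked_positions_spec : Claim_equal_calculate_stacked_positions := by
  intro start_x start_y spacing image_heights _
  unfold Spec_calculate_stacked_positions calculate_stacked_positions calculate_stacked_positions_alt
  simp [PySem.List.enumerate, PySem.List.pyRange, PySem.Dict.insert, PySem.Dict.empty, pvEffHeight,
        List.range_succ]
  split_ifs <;> simp <;> omega
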